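-- pv_equiv track=rewrite | github.com/jamolmahmudov/list_search | find06_max_odd.py | find_max_odd
-- ===== SOURCE A (Python) =====
-- def find_max_odd(data):
--     """
--     Given the list of numbers, Find the maximum odd number in the list
--     args:
--         data: list of numbers
--     returns: maximum odd number in the list
--     """
--     i=0
--     k=0
--     while i<len(data):
--         if data[i]%2==1:
--             k=data[i]
--         i+=1
--
--     return k
-- ===== SOURCE B (Python) =====
-- def find_max_odd(data):
--     for x in reversed(data):
--         if x % 2 == 1:
--             return x
--     return 0
-- ===== Notes on version B (the rewrite author's own statement) =====
-- stated objective: idiomatic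
-- what changed: Scan the list in reverse and return the first odd element found (short-circuit early exit), instead of forward-scanning the whole list while overwriting an accumulator; default 0 kept.
import Mathlib
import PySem

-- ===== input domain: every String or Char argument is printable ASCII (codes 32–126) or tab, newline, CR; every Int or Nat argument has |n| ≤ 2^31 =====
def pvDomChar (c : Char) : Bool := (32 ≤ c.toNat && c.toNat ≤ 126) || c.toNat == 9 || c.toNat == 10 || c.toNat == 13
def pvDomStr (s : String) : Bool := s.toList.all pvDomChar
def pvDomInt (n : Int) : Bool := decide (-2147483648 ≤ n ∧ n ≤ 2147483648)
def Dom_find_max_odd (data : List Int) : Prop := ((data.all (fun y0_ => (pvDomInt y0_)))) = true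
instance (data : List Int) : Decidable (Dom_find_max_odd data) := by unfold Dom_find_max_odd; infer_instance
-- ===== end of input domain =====

-- ===== PORT A =====
-- A: forward scan, accumulator k overwritten by every odd element; returns last odd or 0
def find_max_odd (data : List Int) : Int :=
  data.foldl (fun k d => if PySem.Int.mod d 2 = 1 then d else k) 0

-- ===== PORT B =====
-- B: reverse scan, return first odd found, else 0
def altGo : List Int → Int
  | [] => 0
  | x :: xs => if PySem.Int.mod x 2 = 1 then x else altGo xs

def find_max_odd_alt (data : List Int) : Int := altGo data.reverse

-- ===== PRECONDITION & SPEC =====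
def Spec_find_max_odd (data : List Int) (out : Int) : Prop := out = find_max_odd_alt data
instance (data : List Int) (out : Int) : Decidable (Spec_find_max_odd data out) := by unfold Spec_find_max_odd; infer_instance

-- ===== CLAIM (what is proved, stated in full; the proofs are below) =====
def Claim_equal_find_max_odd : Prop := ∀ (data : List Int), Dom_find_max_odd data → Spec_find_max_odd data (find_max_odd data)

-- ===== LEMMAS AND PROOFS =====

-- ===== VERDICT (by name: the statement is the Claim_ definition above) =====
-- proof helper: reverse scan with an explicit default accumulator
def altGoWith : List Int → Int → Int
  | [], k => k
  | x :: xs, k => if PySem.Int.mod x 2 = 1 then x else altGoWith xs k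

theorem altGoWith_append (l : List Int) (x k : Int) :
    altGoWith (l ++ [x]) k = altGoWith l (if PySem.Int.mod x 2 = 1 then x else k) := by
  induction l with
  | nil => simp [altGoWith]
  | cons y l ih => simp [altGoWith, ih]

theorem altGo_eq_with (l : List Int) : altGo l = altGoWith l 0 := by
  induction l with
  | nil => rfl
  | cons y l ih => simp [altGo, altGoWith, ih]

theorem foldl_eq_altGoWith (xs : List Int) (k : Int) :
    xs.foldl (fun k d => if PySem.Int.mod d 2 = 1 then d else k) k = altGoWith xs.reverse k := by
  induction xs generalizing k with
  | nil => rfl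
  | cons x xs ih => simp only [List.foldl_cons, List.reverse_cons, altGoWith_append, ih]

-- ===== VERDICT =====
theorem find_max_odd_spec : Claim_equal_find_max_odd := by
  intro data _
  unfold Spec_find_max_odd find_max_odd find_max_odd_alt
  rw [altGo_eq_with, foldl_eq_altGoWith]
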